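-- pv_equiv track=rewrite | github.com/AIOCodeBase/GFGPOTD | Problems & Solutions/T/Two numbers with odd occurrences/08 November 2022/Python/Two numbers with odd occurrences.py | twoOddNum
-- ===== SOURCE A (Python) =====
-- def twoOddNum(Arr, N):
--     dic = {}
--     for i in range(len(Arr)):
--         dic[Arr[i]] = dic[Arr[i]] + 1 if Arr[i] in dic else 1
--     val = list(dic.values())
--     ke = list(dic.keys())
--     lst = []
--     for j in range(len(val)):
--         if val[j] %2 != 0:
--             lst.append(ke[j])
--     lst.sort()
--     lst = lst[::-1]
--     return lst
-- ===== SOURCE B (Python) =====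
-- def twoOddNum(Arr, N):
--     s = sorted(Arr)
--     res = []
--     i = 0
--     while i < len(s):
--         j = i + 1
--         while j < len(s) and s[j] == s[i]:
--             j += 1
--         if (j - i) % 2 == 1:
--             res.append(s[i])
--         i = j
--     res.reverse()
--     return res
-- ===== Notes on version B (the rewrite author's own statement) =====
-- stated objective: alternative
-- what changed: Replaces A's hash-count dict plus sort-of-odd-keys with a sort-then-linear-run-scan: B sorts a copy of Arr once, counts each run of equal values in one pass, keeps values with odd run length (ascending), and reverses.
import Mathlib
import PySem

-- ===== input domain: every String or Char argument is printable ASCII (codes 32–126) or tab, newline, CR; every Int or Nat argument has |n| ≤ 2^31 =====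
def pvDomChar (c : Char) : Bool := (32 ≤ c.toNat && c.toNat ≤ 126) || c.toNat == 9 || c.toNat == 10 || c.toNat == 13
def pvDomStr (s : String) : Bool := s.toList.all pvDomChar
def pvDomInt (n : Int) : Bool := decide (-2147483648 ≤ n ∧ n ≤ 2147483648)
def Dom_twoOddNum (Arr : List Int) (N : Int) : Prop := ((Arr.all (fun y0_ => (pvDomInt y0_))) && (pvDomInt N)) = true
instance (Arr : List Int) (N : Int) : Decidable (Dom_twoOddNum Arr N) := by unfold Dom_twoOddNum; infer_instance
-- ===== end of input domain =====

-- B replaces A's dict-of-counts + sort-of-odd-keys with a single sort of Arr followed by a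
-- linear run-length scan; same return value, and neither A nor B mutates Arr.

-- ===== PORT A =====
-- one iteration of A's counting loop: dic[Arr[i]] = dic[Arr[i]] + 1 if Arr[i] in dic else 1
def twoOddNumStep (d : PySem.Dict Int Int) (x : Int) : PySem.Dict Int Int :=
  if d.contains x then d.insert x (d.getD x 0 + 1) else d.insert x 1

def twoOddNum (Arr : List Int) (N : Int) : List Int :=
  let dic := (PySem.List.pyRange 0 (PySem.List.len Arr)).foldl
    (fun d i => twoOddNumStep d (PySem.List.pyGetD Arr i 0)) PySem.Dict.empty
  let val := dic.values
  let ke := dic.keys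
  let lst := (PySem.List.pyRange 0 (PySem.List.len val)).foldl
    (fun acc j => if PySem.Int.mod (PySem.List.pyGetD val j 0) 2 ≠ 0
                  then acc ++ [PySem.List.pyGetD ke j 0] else acc) []
  (PySem.List.slice? (PySem.List.sorted lst id) none none (-1)).getD []

-- ===== PORT B =====
-- the outer while loop of B: each step consumes one run of equal values of the sorted list,
-- keeping the value when the run length is odd
def runScan : List Int → List Int
  | [] => []
  | x :: xs =>
    (if ((xs.takeWhile (fun y => y == x)).length + 1) % 2 == 1 then [x] else [])
      ++ runScan (xs.dropWhile (fun y => y == x))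
termination_by s => s.length
decreasing_by
  simpa using Nat.lt_succ_of_le (List.length_dropWhile_le _ _)

def twoOddNum_alt (Arr : List Int) (N : Int) : List Int :=
  (runScan (PySem.List.sorted Arr id)).reverse

-- ===== PRECONDITION & SPEC =====
def Spec_twoOddNum (Arr : List Int) (N : Int) (out : List Int) : Prop := out = twoOddNum_alt Arr N
instance (Arr : List Int) (N : Int) (out : List Int) : Decidable (Spec_twoOddNum Arr N out) := by unfold Spec_twoOddNum; infer_instance

-- ===== CLAIM (what is proved, stated in full; the proofs are below) =====
def Claim_equal_twoOddNum : Prop := ∀ (Arr : List Int) (N : Int), Dom_twoOddNum Arr N → Spec_twoOddNum Arr N (twoOddNum Arr N)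

-- ===== LEMMAS AND PROOFS =====

theorem find?_beq_self (x : Int) (l : List Int) (h : x ∈ l) :
    l.find? (fun k => k == x) = some x := by
  induction l with
  | nil => cases h
  | cons a l ih =>
    rcases List.mem_cons.mp h with rfl | h'
    · simp
    · by_cases hax : a = x
      · subst hax; simp
      · rw [List.find?_cons_of_neg (by simp [hax])]; exact ih h'

theorem dic_items (xs : List Int) :
    (xs.foldl twoOddNumStep PySem.Dict.empty).items
      = (PySem.List.dedup xs).map (fun k => (k, (xs.count k : Int))) := by
  induction xs using List.reverseRecOn with
  | nil => rfl
  | append_singleton xs x ih =>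
    rw [List.foldl_append, List.foldl_cons, List.foldl_nil]
    set d := xs.foldl twoOddNumStep PySem.Dict.empty with hd
    have hdedup : PySem.List.dedup (xs ++ [x])
        = if x ∈ xs then PySem.List.dedup xs else PySem.List.dedup xs ++ [x] := by
      rw [show PySem.List.dedup (xs ++ [x]) = PySem.Set.ofList (xs ++ [x]) from rfl,
        PySem.Set.ofList_append_singleton]
      unfold PySem.Set.add
      by_cases hx : x ∈ xs
      · simp [PySem.Set.contains, hx]
      · simp [PySem.Set.contains, hx]
    have hcont : d.contains x = decide (x ∈ xs) := by
      rw [PySem.Dict.contains, ih, List.any_map]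
      simp [Function.comp_def, List.any_beq']
    by_cases hx : x ∈ xs
    · have hfind : List.find? (fun k => k == x) (PySem.List.dedup xs) = some x :=
        find?_beq_self x _ ((PySem.List.mem_dedup xs x).mpr hx)
      have hgetD : d.getD x 0 = (xs.count x : Int) := by
        rw [PySem.Dict.getD, PySem.Dict.get?, ih, List.find?_map]
        simp only [Function.comp_def]
        rw [hfind]
        rfl
      have hstep : twoOddNumStep d x = d.insert x (d.getD x 0 + 1) := by
        rw [twoOddNumStep, hcont]; simp [hx]
      rw [hstep, PySem.Dict.insert, hcont]
      simp only [hx, decide_true, if_true, ih, hgetD, hdedup, List.map_map]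
      apply List.map_congr_left
      intro k hk
      by_cases hkx : k = x
      · subst hkx
        simp [List.count_append]
      · simp [hkx, List.count_append, List.count_singleton']
        intro h; exact absurd h.symm hkx
    · have hstep : twoOddNumStep d x = d.insert x 1 := by
        rw [twoOddNumStep, hcont]; simp [hx]
      rw [hstep, PySem.Dict.insert, hcont]
      simp only [hx, decide_false, Bool.false_eq_true, if_false, ih, hdedup, List.map_append]
      congr 1
      · apply List.map_congr_left
        intro k hk
        have hkx : k ≠ x := fun h => hx (h ▸ (PySem.List.mem_dedup xs k).mp hk)
        simp [List.count_append, List.count_singleton']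
        intro h; exact absurd h.symm hkx
      · simp [List.count_append, List.count_eq_zero.mpr hx]
theorem loop2 (items : List (Int × Int)) :
    (PySem.List.pyRange 0 (PySem.List.len (items.map Prod.snd))).foldl
      (fun acc j => if PySem.Int.mod (PySem.List.pyGetD (items.map Prod.snd) j 0) 2 ≠ 0
                    then acc ++ [PySem.List.pyGetD (items.map Prod.fst) j 0] else acc) ([] : List Int)
      = (items.filter (fun p => PySem.Int.mod p.2 2 != 0)).map Prod.fst := by
  induction items using List.reverseRecOn with
  | nil => rfl
  | append_singleton items p ih =>
    have hlen : PySem.List.len ((items ++ [p]).map Prod.snd) = (items.length : Int) + 1 := by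
      simp [PySem.List.len_eq]
    rw [hlen, PySem.List.pyRange_one_succ_right (by positivity), List.foldl_append]
    have hcongr : ∀ (acc : List Int), ∀ j ∈ PySem.List.pyRange 0 (items.length : Int),
        (if PySem.Int.mod (PySem.List.pyGetD ((items ++ [p]).map Prod.snd) j 0) 2 ≠ 0
         then acc ++ [PySem.List.pyGetD ((items ++ [p]).map Prod.fst) j 0] else acc)
        = (if PySem.Int.mod (PySem.List.pyGetD (items.map Prod.snd) j 0) 2 ≠ 0
           then acc ++ [PySem.List.pyGetD (items.map Prod.fst) j 0] else acc) := by
      intro acc j hj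
      obtain ⟨h0, h1⟩ := PySem.List.mem_pyRange_one.mp hj
      have hjl : j.toNat < items.length := by omega
      rw [PySem.List.pyGetD_eq_getElem _ _ h0 (by simp; omega),
        PySem.List.pyGetD_eq_getElem _ _ h0 (by simp; omega),
        PySem.List.pyGetD_eq_getElem _ _ h0 (by simpa using h1),
        PySem.List.pyGetD_eq_getElem _ _ h0 (by simpa using h1)]
      simp only [List.map_append, List.map_cons, List.map_nil]
      rw [List.getElem_append_left (by simpa using hjl),
        List.getElem_append_left (by simpa using hjl)]
    simp only [PySem.List.len_eq, List.length_map] at ih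
    rw [PySem.List.foldl_congr_mem _ _ _ _ hcongr, ih]
    have hgetv : PySem.List.pyGetD ((items ++ [p]).map Prod.snd) (items.length : Int) 0 = p.2 := by
      rw [PySem.List.pyGetD_eq_getElem _ _ (by positivity) (by simp)]
      simp
    have hgetk : PySem.List.pyGetD ((items ++ [p]).map Prod.fst) (items.length : Int) 0 = p.1 := by
      rw [PySem.List.pyGetD_eq_getElem _ _ (by positivity) (by simp)]
      simp
    rw [List.foldl_cons, List.foldl_nil, hgetv, hgetk]
    by_cases hp : p.2 % 2 = 1 <;>
      simp [List.filter_append, hp]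
theorem gt_of_mem_dropWhile (x : Int) (xs : List Int)
    (hs : (x :: xs).Pairwise (· ≤ ·)) :
    ∀ y ∈ xs.dropWhile (fun y => y == x), x < y := by
  intro y hy
  have hsub : (xs.dropWhile (fun y => y == x)).Sublist xs := List.dropWhile_sublist _
  rcases hdw : xs.dropWhile (fun y => y == x) with _ | ⟨h, d'⟩
  · rw [hdw] at hy; cases hy
  · rw [hdw] at hy hsub
    have hhx : h ≠ x := by
      have := List.head_dropWhile_not (fun y => y == x) (l := xs) (by rw [hdw]; simp)
      simp [hdw] at this; exact this
    have hxh : x < h := by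
      have : x ≤ h := (List.pairwise_cons.mp hs).1 h (hsub.mem (by simp))
      omega
    rcases List.mem_cons.mp hy with rfl | hy'
    · exact hxh
    · have hpd : (h :: d').Pairwise (· ≤ ·) := ((List.pairwise_cons.mp hs).2).sublist hsub
      have : h ≤ y := (List.pairwise_cons.mp hpd).1 y hy'
      omega

theorem count_head_run (x : Int) (xs : List Int)
    (hs : (x :: xs).Pairwise (· ≤ ·)) :
    (x :: xs).count x = (xs.takeWhile (fun y => y == x)).length + 1 := by
  conv_lhs => rw [show xs = xs.takeWhile (fun y => y == x) ++ xs.dropWhile (fun y => y == x)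
    from (List.takeWhile_append_dropWhile).symm]
  rw [List.count_cons_self, List.count_append]
  have h1 : (xs.takeWhile (fun y => y == x)).count x = (xs.takeWhile (fun y => y == x)).length :=
    List.count_eq_length.mpr (fun y hy => by
      have := List.mem_takeWhile_imp hy; simp at this; omega)
  have h2 : (xs.dropWhile (fun y => y == x)).count x = 0 :=
    List.count_eq_zero.mpr (fun hx => by
      have := gt_of_mem_dropWhile x xs hs x hx; omega)
  omega

theorem count_ne_head (x y : Int) (xs : List Int) (hyx : y ≠ x) :
    (x :: xs).count y = (xs.dropWhile (fun y => y == x)).count y := by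
  conv_lhs => rw [show xs = xs.takeWhile (fun y => y == x) ++ xs.dropWhile (fun y => y == x)
    from (List.takeWhile_append_dropWhile).symm]
  rw [List.count_cons_of_ne (by simpa [eq_comm] using hyx), List.count_append]
  have h1 : (xs.takeWhile (fun y => y == x)).count y = 0 :=
    List.count_eq_zero.mpr (fun hy => by
      have := List.mem_takeWhile_imp hy; simp at this; omega)
  omega

theorem runScan_mem (l : List Int) (hs : l.Pairwise (· ≤ ·)) (y : Int) :
    y ∈ runScan l ↔ y ∈ l ∧ l.count y % 2 = 1 := by
  induction l using runScan.induct with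
  | case1 => simp [runScan]
  | case2 x xs ih =>
    have hd : (xs.dropWhile (fun y => y == x)).Pairwise (· ≤ ·) :=
      ((List.pairwise_cons.mp hs).2).sublist (List.dropWhile_sublist _)
    have ihy := ih hd
    rw [runScan]
    by_cases hyx : y = x
    · subst hyx
      have hcnt := count_head_run y xs hs
      have hnot : y ∉ xs.dropWhile (fun z => z == y) := fun h => by
        have := gt_of_mem_dropWhile y xs hs y h; omega
      constructor
      · intro hmem
        rcases List.mem_append.mp hmem with hm | hm
        · constructor
          · simp
          · rw [hcnt]
            by_cases hpar : ((xs.takeWhile (fun z => z == y)).length + 1) % 2 == 1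
            · simpa using hpar
            · simp [hpar] at hm
        · exact absurd ((ihy.mp hm).1) hnot
      · rintro ⟨-, hpar⟩
        rw [hcnt] at hpar
        simp [hpar]
    · have hc := count_ne_head x y xs hyx
      constructor
      · intro hmem
        rcases List.mem_append.mp hmem with hm | hm
        · by_cases hpar : ((xs.takeWhile (fun z => z == x)).length + 1) % 2 == 1 <;>
            simp [hpar] at hm <;> exact absurd hm hyx
        · obtain ⟨hy1, hy2⟩ := ihy.mp hm
          exact ⟨List.mem_cons_of_mem _ ((List.dropWhile_sublist _).mem hy1), by omega⟩
      · rintro ⟨hy1, hy2⟩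
        apply List.mem_append_right
        apply ihy.mpr
        refine ⟨?_, by omega⟩
        rcases List.mem_cons.mp hy1 with rfl | hy'
        · exact absurd rfl hyx
        · -- y ∈ xs, y ≠ x ⇒ y ∈ dropWhile
          conv at hy' => rw [show xs = xs.takeWhile (fun z => z == x) ++ xs.dropWhile (fun z => z == x)
            from (List.takeWhile_append_dropWhile).symm]
          rcases List.mem_append.mp hy' with h | h
          · have := List.mem_takeWhile_imp h; simp at this; exact absurd this hyx
          · exact h

theorem runScan_pairwise_lt (l : List Int) (hs : l.Pairwise (· ≤ ·)) :
    (runScan l).Pairwise (· < ·) := by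
  induction l using runScan.induct with
  | case1 => simp [runScan]
  | case2 x xs ih =>
    have hd : (xs.dropWhile (fun y => y == x)).Pairwise (· ≤ ·) :=
      ((List.pairwise_cons.mp hs).2).sublist (List.dropWhile_sublist _)
    rw [runScan]
    apply List.pairwise_append.mpr
    refine ⟨?_, ih hd, ?_⟩
    · by_cases hpar : ((xs.takeWhile (fun z => z == x)).length + 1) % 2 == 1 <;> simp [hpar]
    · intro a ha b hb
      have hb' : b ∈ xs.dropWhile (fun y => y == x) :=
        ((runScan_mem _ hd b).mp hb).1
      have hxb := gt_of_mem_dropWhile x xs hs b hb'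
      by_cases hpar : ((xs.takeWhile (fun z => z == x)).length + 1) % 2 == 1 <;>
        simp [hpar] at ha
      · subst ha; exact hxb

-- bridge between A's Int parity test on a count and B's Nat parity
theorem parity_bridge (c : Nat) : (PySem.Int.mod (c : Int) 2 != 0) = true ↔ c % 2 = 1 := by
  rw [PySem.Int.mod_eq_emod_of_pos (by norm_num)]
  simp
  omega

-- ===== VERDICT (by name: the statement is the Claim_ definition above) =====
theorem twoOddNum_spec : Claim_equal_twoOddNum := by
  intro Arr N _
  unfold Spec_twoOddNum twoOddNum twoOddNum_alt
  rw [PySem.List.foldl_pyRange_pyGetD Arr 0 twoOddNumStep PySem.Dict.empty (le_refl 0)]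
  simp only [Int.toNat_zero, List.drop_zero]
  simp only [PySem.Dict.values, PySem.Dict.keys,
    show (fun (x : Int × Int) => x.2) = Prod.snd from rfl,
    show (fun (x : Int × Int) => x.1) = Prod.fst from rfl]
  rw [loop2, dic_items, List.filter_map, List.map_map]
  have hfst : (Prod.fst ∘ fun k => (k, ((Arr.count k : Int)))) = id := rfl
  rw [hfst, List.map_id]
  rw [PySem.List.slice?_none_none_neg_one, Option.getD_some]
  congr 1
  set S := PySem.List.sorted Arr id with hS
  have hSp : S.Pairwise (· ≤ ·) := by
    simpa using PySem.List.sorted_pairwise Arr id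
  have hperm : S.Perm Arr := PySem.List.sorted_perm Arr id false
  apply PySem.List.sorted_eq_of_perm_of_pairwise_lt
  · rw [List.perm_ext_iff_of_nodup
      ((runScan_pairwise_lt S hSp).imp (fun h => ne_of_lt h))
      ((PySem.List.nodup_dedup Arr).filter _)]
    intro a
    rw [runScan_mem S hSp a, List.mem_filter]
    simp only [Function.comp_def, PySem.List.mem_dedup, hperm.mem_iff, hperm.count_eq,
      parity_bridge]
  · simpa using runScan_pairwise_lt S hSp
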